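-- pv_equiv track=rewrite | github.com/gabriel11475/Algoritmos-de-ia-ufla-20241 | algoritmo genetico/algoritmo genetico by gabriel augusto.py | somaUm
-- ===== SOURCE A (Python) =====
-- def somaUm( vetor):
--     somando = 1
--     i = len(vetor)-1
--     while i >=0:
--         if( vetor[i]==0):
--             vetor[i]=somando
--             somando =0
--         if(vetor[i]+somando==2):
--             vetor[i]=0
--         else:
--             i=-1
--         i=i-1
--     return vetor
-- ===== SOURCE B (Python) =====
-- def somaUm(vetor):
--     # Functional reformulation: reverse-copy the list, count the run of leading ones
--     # with a generator over enumerate, then rebuild the answer in bulk and write it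
--     # back through slice assignment (same in-place mutation of the argument as A).
--     rev = vetor[::-1]
--     k = next((j for j, x in enumerate(rev) if x != 1), len(rev))
--     if k < len(rev) and rev[k] == 0:
--         head = [1] + rev[k + 1:]
--     else:
--         head = rev[k:]
--     vetor[:] = (k * [0] + head)[::-1]
--     return vetor
-- ===== Notes on version B (the rewrite author's own statement) =====
-- stated objective: alternative
-- what changed: Replaced A's in-place indexed loop with a carry flag and a combined double-if state machine by a functional rebuild: reverse-copy the list, count the run of leading ones with a generator over enumerate, construct the new list in bulk (zeros ++ stop bit ++ untouched prefix) and write it back with one slice assignment.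
import Mathlib
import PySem

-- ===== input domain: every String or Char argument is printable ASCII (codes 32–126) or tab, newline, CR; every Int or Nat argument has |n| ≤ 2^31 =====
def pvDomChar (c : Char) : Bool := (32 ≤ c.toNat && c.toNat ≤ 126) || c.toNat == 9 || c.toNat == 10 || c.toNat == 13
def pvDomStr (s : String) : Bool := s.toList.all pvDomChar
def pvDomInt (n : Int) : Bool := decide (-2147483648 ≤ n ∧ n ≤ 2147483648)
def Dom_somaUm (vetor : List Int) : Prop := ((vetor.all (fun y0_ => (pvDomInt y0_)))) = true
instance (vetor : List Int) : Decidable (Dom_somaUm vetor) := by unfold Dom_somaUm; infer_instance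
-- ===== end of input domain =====

-- B rebuilds the incremented vector functionally from a reversed copy instead of A's in-place
-- carry-flag loop (objective: alternative); both Pythons mutate the argument to the same final
-- contents, and the equivalence proved here is about the returned value.

-- ===== PORT A =====
-- A's while loop over (vetor, somando, i); the 'else i=-1; i=i-1' exit is the direct return.
def somaUmLoop (v : List Int) (somando : Int) (i : Int) : List Int :=
  if _h : 0 ≤ i then
    let x := (PySem.List.pyGet? v i).getD 0
    let v1 := if x == 0 then v.set i.toNat somando else v
    let s1 : Int := if x == 0 then 0 else somando
    let y := (PySem.List.pyGet? v1 i).getD 0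
    if y + s1 == 2 then somaUmLoop (v1.set i.toNat 0) s1 (i - 1)
    else v1
  else v
termination_by (i + 1).toNat
decreasing_by omega

def somaUm (vetor : List Int) : List Int :=
  somaUmLoop vetor 1 (vetor.length - 1)

-- ===== PORT B =====
-- B's generator 'next((j for j, x in enumerate(rev) if x != 1), len(rev))':
-- index of the first element ≠ 1 (= length of the run of leading ones).
def firstNonOne : List Int → Nat
  | [] => 0
  | x :: xs => if x == 1 then firstNonOne xs + 1 else 0

-- B: rev = vetor[::-1]; k = firstNonOne rev; head per the if; write back (k*[0] ++ head)[::-1].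
-- (rev[k] is guarded by k < len(rev), so getD is exact there.)
def somaUm_alt (vetor : List Int) : List Int :=
  let rev := vetor.reverse
  let k := firstNonOne rev
  let head := if k < rev.length ∧ rev.getD k 0 == 0 then 1 :: rev.drop (k + 1) else rev.drop k
  (List.replicate k 0 ++ head).reverse

-- ===== PRECONDITION & SPEC =====
def Spec_somaUm (vetor : List Int) (out : List Int) : Prop := out = somaUm_alt vetor
instance (vetor : List Int) (out : List Int) : Decidable (Spec_somaUm vetor out) := by unfold Spec_somaUm; infer_instance

-- ===== CLAIM (what is proved, stated in full; the proofs are below) =====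
def Claim_equal_somaUm : Prop := ∀ (vetor : List Int), Dom_somaUm vetor → Spec_somaUm vetor (somaUm vetor)

-- ===== LEMMAS AND PROOFS =====

-- A's loop only reads and writes indices ≤ i, so a trailing element is preserved.
theorem pyGet?_append_lt (u : List Int) (t : Int) (i : Int) (h0 : 0 ≤ i) (h1 : i < (u.length : Int)) :
    PySem.List.pyGet? (u ++ [t]) i = PySem.List.pyGet? u i := by
  rw [PySem.List.pyGet?_of_nonneg _ h0, PySem.List.pyGet?_of_nonneg _ h0]
  rw [List.getElem?_append_left (by omega)]

theorem set_append_lt (u : List Int) (t z : Int) (k : Nat) (h : k < u.length) :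
    (u ++ [t]).set k z = u.set k z ++ [t] := by
  rw [List.set_append]; simp [h]

theorem somaUmLoop_append (n : Nat) : ∀ (i : Int), (i + 1).toNat = n → ∀ (w : List Int) (s t : Int),
    i < (w.length : Int) →
    somaUmLoop (w ++ [t]) s i = somaUmLoop w s i ++ [t] := by
  induction n with
  | zero =>
    intro i hi w s t _
    have hneg : ¬ (0 ≤ i) := by omega
    rw [somaUmLoop, somaUmLoop]; simp [hneg]
  | succ n ih =>
    intro i hi w s t hlt
    have hpos : 0 ≤ i := by omega
    have hget := pyGet?_append_lt w t i hpos hlt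
    rw [somaUmLoop, somaUmLoop]
    simp only [hpos, dif_pos, hget]
    by_cases h0 : ((PySem.List.pyGet? w i).getD 0 == 0) = true
    · simp only [h0, if_pos]
      rw [set_append_lt w t s i.toNat (by omega)]
      rw [pyGet?_append_lt (w.set i.toNat s) t i hpos (by simpa using hlt)]
      by_cases h2 : (((PySem.List.pyGet? (w.set i.toNat s) i).getD 0) + 0 == 2) = true
      · simp only [h2, if_pos]
        rw [set_append_lt (w.set i.toNat s) t 0 i.toNat (by simp only [List.length_set]; omega)]
        exact ih (i - 1) (by omega) ((w.set i.toNat s).set i.toNat 0) 0 t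
          (by simp only [List.length_set]; omega)
      · have h2' : ¬ ((PySem.List.pyGet? (w.set i.toNat s) i).getD 0 + 0 = 2) := by
          simpa using h2
        have h2'' : ¬ ((PySem.List.pyGet? (w.set i.toNat s) i).getD 0 = 2) := by omega
        simp [h2'']
    · have h0' : ¬ ((PySem.List.pyGet? w i).getD 0 = 0) := by simpa using h0
      by_cases h2 : (((PySem.List.pyGet? w i).getD 0) + s == 2) = true
      · simp only [h0, Bool.false_eq_true, if_false, hget, h2, if_pos]
        rw [set_append_lt w t 0 i.toNat (by omega)]
        exact ih (i - 1) (by omega) (w.set i.toNat 0) s t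
          (by simp only [List.length_set]; omega)
      · have h2' : ¬ ((PySem.List.pyGet? w i).getD 0 + s = 2) := by simpa using h2
        simp [hget, h0', h2']

-- ===== VERDICT (by name: the statement is the Claim_ definition above) =====
theorem somaUm_spec : Claim_equal_somaUm := by
  intro vetor hdom
  unfold Spec_somaUm
  induction vetor using List.reverseRecOn with
  | nil =>
    rw [somaUm, somaUm_alt, somaUmLoop]; simp [firstNonOne]
  | append_singleton v' x ih =>
    rw [somaUm, somaUmLoop]
    have hlen : ((v' ++ [x]).length : Int) - 1 = (v'.length : Int) := by simp
    have hpos : (0 : Int) ≤ (v'.length : Int) := by positivity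
    have hget : PySem.List.pyGet? (v' ++ [x]) (v'.length : Int) = some x := by
      rw [PySem.List.pyGet?_natCast]; simp
    rw [hlen]
    simp only [hpos, dif_pos, hget, Option.getD_some]
    have hrev : (v' ++ [x]).reverse = x :: v'.reverse := by simp
    by_cases h1 : x = 1
    · -- trailing one: A clears it and recurses; B counts it into k
      subst h1
      have hset : (v' ++ [(1:Int)]).set v'.length 0 = v' ++ [0] := by
        rw [List.set_append]; simp
      have hd : Dom_somaUm v' := by
        unfold Dom_somaUm at hdom ⊢
        simp only [List.all_append, Bool.and_eq_true] at hdom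
        exact hdom.1
      norm_num [hset]
      rw [somaUmLoop_append ((v'.length : Int) - 1 + 1).toNat _ rfl v' 1 0 (by omega)]
      rw [somaUm] at ih
      rw [ih hd]
      rw [somaUm_alt, somaUm_alt]
      simp only [hrev, firstNonOne]
      norm_num
      rw [List.replicate_succ']
    · by_cases h0 : x = 0
      · -- trailing zero: A writes the 1 and exits; B's k = 0 and the stop condition fires
        subst h0
        have hset : (v' ++ [(0:Int)]).set v'.length 1 = v' ++ [1] := by
          rw [List.set_append]; simp
        have hget1 : PySem.List.pyGet? (v' ++ [(1:Int)]) (v'.length : Int) = some 1 := by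
          rw [PySem.List.pyGet?_natCast]; simp
        norm_num [hset, hget1]
        rw [somaUm_alt]
        simp only [hrev, firstNonOne]
        norm_num [List.getD]
      · -- non-binary trailing element: both leave everything unchanged
        have hx0 : ¬ ((x == 0) = true) := by simp [h0]
        have hx2 : ¬ ((x + 1 == 2) = true) := by
          simp; intro h; exact h1 (by omega)
        simp only [hx0, if_false, Bool.false_eq_true]
        rw [somaUm_alt]
        simp only [hrev, firstNonOne]
        have hxne1 : ¬ ((x == 1) = true) := by simp [h1]
        rw [if_neg hxne1]
        simp [hx0, hx2, List.getD]
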